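-- pv_equiv track=rewrite | github.com/verl-project/verl | verl/trainer/main_generation.py | _translate_legacy_cli_args
-- ===== SOURCE A (Python) =====
-- _LEGACY_ARG_PREFIX_MAP = {
--     "model.": "actor_rollout_ref.model.",
--     "rollout.": "actor_rollout_ref.rollout.",
-- }
--
-- _LEGACY_ARG_EXACT_MAP = {
--     "data.path": "data.train_files",
--     "data.n_samples": "actor_rollout_ref.rollout.n",
-- }
--
-- def _translate_legacy_cli_args(args: list[str]) -> list[str]:
--     translated_args = []
--     has_rollout_name = False
--     saw_legacy_rollout_arg = False
--
--     for arg in args: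
--         remapped = arg
--         if "=" in arg:
--             key, value = arg.split("=", 1)
--             normalized_key = key[1:] if key.startswith("+") else key
--
--             if normalized_key == "actor_rollout_ref.rollout.name":
--                 has_rollout_name = True
--
--             if normalized_key in _LEGACY_ARG_EXACT_MAP:
--                 new_key = _LEGACY_ARG_EXACT_MAP[normalized_key]
--                 remapped = f"{new_key}={value}"
--             elif normalized_key == "data.output_path":
--                 remapped = f"+data.output_path={value}"
--             else:
--                 for old_prefix, new_prefix in _LEGACY_ARG_PREFIX_MAP.items():
--                     if normalized_key.startswith(old_prefix):
--                         new_key = normalized_key.replace(old_prefix, new_prefix, 1)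
--                         remapped = f"{new_key}={value}"
--                         if old_prefix == "rollout.":
--                             saw_legacy_rollout_arg = True
--                             if new_key == "actor_rollout_ref.rollout.name":
--                                 has_rollout_name = True
--                         break
--
--         translated_args.append(remapped)
--
--     if saw_legacy_rollout_arg and not has_rollout_name:
--         translated_args.append("actor_rollout_ref.rollout.name=vllm")
--
--     return translated_args
-- ===== SOURCE B (Python) =====
-- _LEGACY_ARG_PREFIX_MAP = {
--     "model.": "actor_rollout_ref.model.",
--     "rollout.": "actor_rollout_ref.rollout.",
-- }
--
-- _LEGACY_ARG_EXACT_MAP = {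
--     "data.path": "data.train_files",
--     "data.n_samples": "actor_rollout_ref.rollout.n",
-- }
--
--
-- def _normalized_key(arg):
--     """Key part before the first '=', with a leading '+' stripped."""
--     key = arg.split("=", 1)[0]
--     return key[1:] if key.startswith("+") else key
--
--
-- def _translate_one(arg):
--     """Pure remapping of a single CLI argument (no flag bookkeeping)."""
--     if "=" not in arg:
--         return arg
--     value = arg.split("=", 1)[1]
--     nk = _normalized_key(arg)
--     if nk in _LEGACY_ARG_EXACT_MAP:
--         return f"{_LEGACY_ARG_EXACT_MAP[nk]}={value}"
--     if nk == "data.output_path":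
--         return f"+data.output_path={value}"
--     for old_prefix, new_prefix in _LEGACY_ARG_PREFIX_MAP.items():
--         if nk.startswith(old_prefix):
--             return f"{nk.replace(old_prefix, new_prefix, 1)}={value}"
--     return arg
--
--
-- def _translate_legacy_cli_args(args: list[str]) -> list[str]:
--     out = [_translate_one(a) for a in args]
--     saw_legacy_rollout_arg = any(
--         "=" in a and _normalized_key(a).startswith("rollout.") for a in args
--     )
--     has_rollout_name = any(
--         "=" in a and _normalized_key(a) in ("actor_rollout_ref.rollout.name", "rollout.name")
--         for a in args
--     )
--     if saw_legacy_rollout_arg and not has_rollout_name: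
--         out.append("actor_rollout_ref.rollout.name=vllm")
--     return out
-- ===== Notes on version B (the rewrite author's own statement) =====
-- stated objective: alternative
-- what changed: A's single stateful pass (accumulator list plus two mutable flags updated inside an inner break-loop) is replaced by a stateless per-argument translator mapped over the list plus two independent any-scans over the original args, using the fact that the rollout-name flag fires exactly on normalized keys 'actor_rollout_ref.rollout.name' or 'rollout.name'.
import Mathlib
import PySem

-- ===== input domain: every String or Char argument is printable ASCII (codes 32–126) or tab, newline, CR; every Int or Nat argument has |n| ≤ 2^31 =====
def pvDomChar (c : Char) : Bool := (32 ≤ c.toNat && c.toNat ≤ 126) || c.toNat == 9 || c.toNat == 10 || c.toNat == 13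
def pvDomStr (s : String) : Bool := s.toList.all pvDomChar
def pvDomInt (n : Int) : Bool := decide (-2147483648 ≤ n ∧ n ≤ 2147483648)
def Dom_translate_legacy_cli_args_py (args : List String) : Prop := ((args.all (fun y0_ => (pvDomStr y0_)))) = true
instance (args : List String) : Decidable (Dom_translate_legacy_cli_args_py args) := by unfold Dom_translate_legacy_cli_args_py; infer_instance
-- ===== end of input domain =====

-- B replaces A's stateful single pass by a stateless map plus two independent any-scans (alternative decomposition, same cost).

-- shared helpers (both Pythons call the same string primitives)
def pvPrefixMap : List (String × String) :=
  [("model.", "actor_rollout_ref.model."), ("rollout.", "actor_rollout_ref.rollout.")]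
def pvExactMap : PySem.Dict String String :=
  PySem.Dict.ofList [("data.path", "data.train_files"), ("data.n_samples", "actor_rollout_ref.rollout.n")]
-- Python string concatenation (f"{a}{b}"): exact
def pvStrCat (a b : String) : String := String.ofList (a.toList ++ b.toList)
-- s.split("=", 1) when "=" in s: split at the FIRST '=' (exact: CPython splits at the first occurrence)
def pvSplitEq1 (s : String) : String × String :=
  let i := (PySem.Str.find s "=").toNat
  (String.ofList (s.toList.take i), String.ofList (s.toList.drop (i + 1)))
-- s.replace(old, new, 1): replace the FIRST occurrence only (exact, including old = "")
def pvReplace1 (s old new : String) : String :=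
  let i := PySem.Str.find s old
  if i = -1 then s
  else String.ofList (s.toList.take i.toNat ++ new.toList ++ s.toList.drop (i.toNat + old.toList.length))

-- ===== PORT A =====
-- the inner 'for old_prefix, new_prefix in _LEGACY_ARG_PREFIX_MAP.items(): ... break' loop:
-- returns (remapped, saw_legacy_rollout_arg set?, has_rollout_name set?) of the first matching prefix
def aPrefixLoop (nk value : String) : List (String × String) → Option (String × Bool × Bool)
  | [] => none
  | (op, np) :: rest =>
    if PySem.Str.startswith nk op then
      let nk' := pvReplace1 nk op np
      some (pvStrCat nk' (pvStrCat "=" value), op == "rollout.",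
            op == "rollout." && nk' == "actor_rollout_ref.rollout.name")
    else aPrefixLoop nk value rest

-- one iteration of A's main loop; state = (translated_args, has_rollout_name, saw_legacy_rollout_arg)
def aStep (st : List String × Bool × Bool) (arg : String) : List String × Bool × Bool :=
  if PySem.Str.isIn "=" arg then
    let kv := pvSplitEq1 arg
    let nk := if PySem.Str.startswith kv.1 "+" then PySem.Str.slice kv.1 (some 1) none else kv.1
    let h1 := st.2.1 || (nk == "actor_rollout_ref.rollout.name")
    if pvExactMap.contains nk then
      (st.1 ++ [pvStrCat (pvExactMap.getD nk "") (pvStrCat "=" kv.2)], h1, st.2.2)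
    else if nk == "data.output_path" then
      (st.1 ++ [pvStrCat "+data.output_path=" kv.2], h1, st.2.2)
    else
      match aPrefixLoop nk kv.2 pvPrefixMap with
      | some (r, sF, hF) => (st.1 ++ [r], h1 || hF, st.2.2 || sF)
      | none => (st.1 ++ [arg], h1, st.2.2)
  else (st.1 ++ [arg], st.2.1, st.2.2)

def translate_legacy_cli_args_py (args : List String) : List String :=
  let st := args.foldl aStep ([], false, false)
  if st.2.2 && !st.2.1 then st.1 ++ ["actor_rollout_ref.rollout.name=vllm"] else st.1

-- ===== PORT B =====
-- _normalized_key(arg): key before the first '=' ('arg.split("=",1)[0]'), leading '+' stripped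
def pvNormKey (arg : String) : String :=
  let key := if PySem.Str.isIn "=" arg then (pvSplitEq1 arg).1 else arg
  if PySem.Str.startswith key "+" then PySem.Str.slice key (some 1) none else key

-- B's pure prefix loop: first matching prefix remap, no flags
def bPrefixLoop (nk value : String) : List (String × String) → Option String
  | [] => none
  | (op, np) :: rest =>
    if PySem.Str.startswith nk op then some (pvStrCat (pvReplace1 nk op np) (pvStrCat "=" value))
    else bPrefixLoop nk value rest

-- _translate_one(arg): pure remapping of a single argument
def pvTranslateOne (arg : String) : String :=
  if PySem.Str.isIn "=" arg then
    let value := (pvSplitEq1 arg).2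
    let nk := pvNormKey arg
    if pvExactMap.contains nk then pvStrCat (pvExactMap.getD nk "") (pvStrCat "=" value)
    else if nk == "data.output_path" then pvStrCat "+data.output_path=" value
    else
      match bPrefixLoop nk value pvPrefixMap with
      | some r => r
      | none => arg
  else arg

def translate_legacy_cli_args_py_alt (args : List String) : List String :=
  let out := args.map pvTranslateOne
  let saw := args.any fun a =>
    PySem.Str.isIn "=" a && PySem.Str.startswith (pvNormKey a) "rollout."
  let named := args.any fun a =>
    PySem.Str.isIn "=" a &&
      (pvNormKey a == "actor_rollout_ref.rollout.name" || pvNormKey a == "rollout.name")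
  if saw && !named then out ++ ["actor_rollout_ref.rollout.name=vllm"] else out

-- ===== PRECONDITION & SPEC =====
def Spec_translate_legacy_cli_args_py (args : List String) (out : List String) : Prop := out = translate_legacy_cli_args_py_alt args
instance (args : List String) (out : List String) : Decidable (Spec_translate_legacy_cli_args_py args out) := by unfold Spec_translate_legacy_cli_args_py; infer_instance

-- ===== CLAIM (what is proved, stated in full; the proofs are below) =====
def Claim_equal_translate_legacy_cli_args_py : Prop := ∀ (args : List String), Dom_translate_legacy_cli_args_py args → Spec_translate_legacy_cli_args_py args (translate_legacy_cli_args_py args)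

-- ===== LEMMAS AND PROOFS =====

-- B's two scan predicates, named for the proofs
def pS (a : String) : Bool :=
  PySem.Str.isIn "=" a && PySem.Str.startswith (pvNormKey a) "rollout."
def pN (a : String) : Bool :=
  PySem.Str.isIn "=" a &&
    (pvNormKey a == "actor_rollout_ref.rollout.name" || pvNormKey a == "rollout.name")

lemma find_eq_zero_of_prefix (s sub : List Char) (h : sub.isPrefixOf s = true) :
    PySem.Chars.find s sub = 0 := by
  cases s with
  | nil =>
    have : sub = [] := by simpa using (List.isPrefixOf_iff_prefix.mp h)
    simp [PySem.Chars.find, PySem.Chars.find.go, this]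
  | cons c t => simp [PySem.Chars.find, PySem.Chars.find.go, h]

lemma replace1_of_prefix (s old new : String) (h : old.toList.isPrefixOf s.toList = true) :
    pvReplace1 s old new = String.ofList (new.toList ++ s.toList.drop old.toList.length) := by
  have hf : PySem.Str.find s old = 0 := by
    rw [PySem.Str.find_eq]; exact find_eq_zero_of_prefix _ _ h
  simp only [pvReplace1]
  rw [hf]
  norm_num

lemma contains_exactMap (nk : String) :
    pvExactMap.contains nk = (nk == "data.path" || nk == "data.n_samples") := by
  have h : pvExactMap.items = [("data.path", "data.train_files"), ("data.n_samples", "actor_rollout_ref.rollout.n")] := by decide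
  simp [PySem.Dict.contains, h, Bool.beq_comm]

lemma beq_toList (a b : String) : (a == b) = (a.toList == b.toList) := by
  by_cases h : a = b
  · subst h; simp
  · have h2 : a.toList ≠ b.toList := fun hl => h (by
      have := congrArg String.ofList hl
      simpa [String.ofList_toList] using this)
    simp [h, h2]

-- the per-argument step lemma: one iteration of A = B's three per-arg computations
lemma step_eq (st : List String × Bool × Bool) (a : String) :
    aStep st a = (st.1 ++ [pvTranslateOne a], st.2.1 || pN a, st.2.2 || pS a) := by
  by_cases h : PySem.Str.isIn "=" a = true
  · -- "=" in a
    simp only [aStep, pvTranslateOne, pN, pS, pvNormKey, h, if_true, Bool.true_and,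
      contains_exactMap]
    generalize ((if PySem.Str.startswith (pvSplitEq1 a).1 "+" then
        PySem.Str.slice (pvSplitEq1 a).1 (some 1) none else (pvSplitEq1 a).1)) = nk
    generalize (pvSplitEq1 a).2 = v
    by_cases hc : (nk == "data.path" || nk == "data.n_samples") = true
    · rcases (by simpa [beq_iff_eq] using hc : nk = "data.path" ∨ nk = "data.n_samples") with h1 | h1 <;>
        subst h1 <;>
        simp [show PySem.Chars.startswith ['d', 'a', 't', 'a', '.', 'p', 'a', 't', 'h']
            ['r', 'o', 'l', 'l', 'o', 'u', 't', '.'] = false from by decide,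
          show PySem.Chars.startswith ['d', 'a', 't', 'a', '.', 'n', '_', 's', 'a', 'm', 'p', 'l', 'e', 's']
            ['r', 'o', 'l', 'l', 'o', 'u', 't', '.'] = false from by decide]
    · have hc' : (nk == "data.path" || nk == "data.n_samples") = false := by simpa using hc
      by_cases ho : nk = "data.output_path"
      · subst ho
        simp [show PySem.Chars.startswith ['d', 'a', 't', 'a', '.', 'o', 'u', 't', 'p', 'u', 't', '_', 'p', 'a', 't', 'h']
            ['r', 'o', 'l', 'l', 'o', 'u', 't', '.'] = false from by decide]
      · have ho' : (nk == "data.output_path") = false := by simpa using ho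
        simp only [hc', ho', Bool.false_eq_true, if_false, aPrefixLoop, bPrefixLoop, pvPrefixMap]
        by_cases hm : PySem.Chars.startswith nk.toList ['m','o','d','e','l','.'] = true
        · -- "model." prefix: neither name key can occur
          have hmS : PySem.Str.startswith nk "model." = true := by
            rw [PySem.Str.startswith_eq, show "model.".toList = ['m','o','d','e','l','.'] from by decide]
            exact hm
          have hpre : "model.".toList.isPrefixOf nk.toList = true := by
            simpa [PySem.Str.startswith_eq, PySem.Chars.startswith] using hmS
          obtain ⟨t, ht⟩ := List.isPrefixOf_iff_prefix.mp hpre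
          have hn1 : (nk == "rollout.name") = false := by
            rw [beq_toList, ← ht]
            simp [show "model.".toList = ['m','o','d','e','l','.'] from by decide,
              show "rollout.name".toList = ['r','o','l','l','o','u','t','.','n','a','m','e'] from by decide]
          have hr : PySem.Chars.startswith nk.toList ['r','o','l','l','o','u','t','.'] = false := by
            simp [PySem.Chars.startswith, ← ht,
              show "model.".toList = ['m','o','d','e','l','.'] from by decide,
              List.isPrefixOf]
          simp [hm, hr, hn1]
        · have hm' : PySem.Chars.startswith nk.toList ['m','o','d','e','l','.'] = false := by simpa using hm
          have hmS : PySem.Str.startswith nk "model." = false := by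
            rw [PySem.Str.startswith_eq, show "model.".toList = ['m','o','d','e','l','.'] from by decide]
            exact hm'
          by_cases hr : PySem.Chars.startswith nk.toList ['r','o','l','l','o','u','t','.'] = true
          · -- "rollout." prefix
            have hrS : PySem.Str.startswith nk "rollout." = true := by
              rw [PySem.Str.startswith_eq, show "rollout.".toList = ['r','o','l','l','o','u','t','.'] from by decide]
              exact hr
            have hpre : "rollout.".toList.isPrefixOf nk.toList = true := by
              simpa [PySem.Str.startswith_eq, PySem.Chars.startswith] using hrS
            obtain ⟨t, ht⟩ := List.isPrefixOf_iff_prefix.mp hpre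
            have hrep : pvReplace1 nk "rollout." "actor_rollout_ref.rollout." =
                String.ofList ("actor_rollout_ref.rollout.".toList ++ t) := by
              rw [replace1_of_prefix _ _ _ hpre, ← ht]
              simp
            have hname : (pvReplace1 nk "rollout." "actor_rollout_ref.rollout."
                == "actor_rollout_ref.rollout.name") = (nk == "rollout.name") := by
              rw [hrep, beq_toList, beq_toList, String.toList_ofList, ← ht,
                show "actor_rollout_ref.rollout.name".toList =
                  "actor_rollout_ref.rollout.".toList ++ "name".toList from by decide,
                show "rollout.name".toList = "rollout.".toList ++ "name".toList from by decide]
              simp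
            have hn1 : (nk == "actor_rollout_ref.rollout.name") = false := by
              rw [beq_toList, ← ht]
              simp [show "rollout.".toList = ['r','o','l','l','o','u','t','.'] from by decide,
                show "actor_rollout_ref.rollout.name".toList =
                  ['a','c','t','o','r','_','r','o','l','l','o','u','t','_','r','e','f','.','r','o','l','l','o','u','t','.','n','a','m','e'] from by decide]
            simp [hm', hr, hname, hn1, Bool.or_comm]
          · have hr' : PySem.Chars.startswith nk.toList ['r','o','l','l','o','u','t','.'] = false := by simpa using hr
            have hrS : PySem.Str.startswith nk "rollout." = false := by
              rw [PySem.Str.startswith_eq, show "rollout.".toList = ['r','o','l','l','o','u','t','.'] from by decide]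
              exact hr'
            have hn1 : (nk == "rollout.name") = false := by
              rw [beq_eq_false_iff_ne]
              rintro rfl
              rw [show PySem.Str.startswith "rollout.name" "rollout." = true from by decide] at hrS
              simp at hrS
            simp [hm', hr', hn1]
  · have h' : PySem.Str.isIn "=" a = false := by simpa using h
    simp only [aStep, pvTranslateOne, pN, pS, h', Bool.false_eq_true, if_false,
      Bool.false_and, Bool.or_false]

lemma fold_eq (args : List String) (st : List String × Bool × Bool) :
    args.foldl aStep st =
      (st.1 ++ args.map pvTranslateOne, st.2.1 || args.any pN, st.2.2 || args.any pS) := by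
  induction args generalizing st with
  | nil => simp
  | cons a rest ih =>
    simp [List.foldl_cons, step_eq, ih, Bool.or_assoc]

-- ===== VERDICT (by name: the statement is the Claim_ definition above) =====
theorem translate_legacy_cli_args_py_spec : Claim_equal_translate_legacy_cli_args_py := by
  intro args _
  show translate_legacy_cli_args_py args = translate_legacy_cli_args_py_alt args
  simp [translate_legacy_cli_args_py, translate_legacy_cli_args_py_alt, fold_eq, pN, pS]
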